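-- pv_equiv track=rewrite | github.com/Jome0169/NoMoreScripting | nomorescripting/annotation/rename_gff_file.py | fix_other
-- ===== SOURCE A (Python) =====
-- def fix_other(gene_string, map_file_dict):
--     """todo: docstring for fix_gene.
--
--     ID=CsGy0G000030.1:cds;Parent=CsGy0G000030.1
--     ID=CsGy0G000030.1:three_prime_utr;Parent=CsGy0G000030.1
--     """
--
--
--     split_gene = gene_string.split(';')
--     rejoin_w_semicolon = []
--     for item in split_gene:
--         rejoin_w_equals = []
--         split_on_equals = item.split('=')
--         for item in split_on_equals:
--             split_colons  = []
--             if ':' in item: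
--                 once_more = item.split(':')
--
--                 #if once_more[0] in map_file_dict:
--                 #    correct_name = mapping_dict[once_more[0]]
--                 #    split_colons.append(correct_name)
--                 #else:
--                 #    split_colons.append([1:])
--
--                 for thing1 in once_more:
--                     if thing1 in map_file_dict:
--                         correct_name = map_file_dict[thing1]
--                         split_colons.append(correct_name)
--                     else:
--                         split_colons.append(thing1)
--                 rejoin_w_real_colon = ':'.join(split_colons)
--                 rejoin_w_equals.append(rejoin_w_real_colon)
--
--             elif ':' not in item:
--                 if item in map_file_dict:
--                     new_name = map_file_dict[item]
--                     rejoin_w_equals.append(new_name)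
--                 else:
--                     rejoin_w_equals.append(item)
--         rejoin_w_semicolon.append('='.join(rejoin_w_equals))
--
--     final_string =(';'.join(rejoin_w_semicolon))
--     return final_string
-- ===== SOURCE B (Python) =====
-- import re
--
-- def fix_other(gene_string, map_file_dict):
--     # One-shot tokenization: parts alternates token, delimiter, token, ...
--     parts = re.split(r'([;=:])', gene_string)
--     for i in range(0, len(parts), 2):
--         parts[i] = map_file_dict.get(parts[i], parts[i])
--     return ''.join(parts)
-- ===== Notes on version B (the rewrite author's own statement) =====
-- stated objective: idiomatic
-- what changed: Replaces the three nested split-on-';'/'='/':' passes with accumulator lists by a single regex tokenization re.split(r'([;=:])', ...) that keeps the delimiters, one in-place replacement pass over the token positions, and one ''.join.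
import Mathlib
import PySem

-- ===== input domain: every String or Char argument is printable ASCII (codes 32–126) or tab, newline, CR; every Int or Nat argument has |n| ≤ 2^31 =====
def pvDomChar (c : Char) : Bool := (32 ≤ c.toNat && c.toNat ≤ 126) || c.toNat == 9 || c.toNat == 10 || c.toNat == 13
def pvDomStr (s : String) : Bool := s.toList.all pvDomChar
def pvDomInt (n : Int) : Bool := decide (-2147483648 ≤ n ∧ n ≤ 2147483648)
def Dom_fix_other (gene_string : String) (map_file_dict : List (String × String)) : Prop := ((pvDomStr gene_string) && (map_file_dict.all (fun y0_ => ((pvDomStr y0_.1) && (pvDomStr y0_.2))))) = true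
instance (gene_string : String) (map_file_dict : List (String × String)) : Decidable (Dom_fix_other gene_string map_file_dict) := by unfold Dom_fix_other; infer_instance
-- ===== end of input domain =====

-- B replaces A's three nested split-on-';'/'='/'ː' passes by one regex tokenization that keeps
-- the delimiters, one replacement pass over the token positions, and one join (idiomatic, same cost).

-- ===== PORT A =====
-- literal port of A: split on ';', per piece split on '=', per piece split on ':' when present,
-- replacing every token found in the dict; dict lookup = first match on the association list.
def fix_other (gene_string : String) (map_file_dict : List (String × String)) : String :=
  let split_gene := PySem.Chars.splitOn gene_string.toList [';']
  let rejoin_w_semicolon := split_gene.foldl (fun rejoin_w_semicolon item =>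
    let rejoin_w_equals := (PySem.Chars.splitOn item ['=']).foldl (fun rejoin_w_equals item =>
      if PySem.Chars.isIn [':'] item then
        let once_more := PySem.Chars.splitOn item [':']
        let split_colons := once_more.foldl (fun split_colons thing1 =>
          match List.lookup (String.ofList thing1) map_file_dict with
          | some correct_name => split_colons ++ [correct_name.toList]
          | none => split_colons ++ [thing1]) ([] : List (List Char))
        rejoin_w_equals ++ [PySem.Chars.join [':'] split_colons]
      else
        match List.lookup (String.ofList item) map_file_dict with
        | some new_name => rejoin_w_equals ++ [new_name.toList]
        | none => rejoin_w_equals ++ [item]) ([] : List (List Char))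
    rejoin_w_semicolon ++ [PySem.Chars.join ['='] rejoin_w_equals]) ([] : List (List Char))
  String.ofList (PySem.Chars.join [';'] rejoin_w_semicolon)

-- ===== PORT B =====
def pvDelim (c : Char) : Bool := c == ';' || c == '=' || c == ':'

-- port of re.split(r'([;=:])', s): tokens and single-char delimiters, strictly alternating,
-- tokens at the even positions
def pvTokenize (acc : List Char) : List Char → List (List Char)
  | [] => [acc.reverse]
  | c :: cs => if pvDelim c then acc.reverse :: [c] :: pvTokenize [] cs else pvTokenize (c :: acc) cs

def fix_other_alt (gene_string : String) (map_file_dict : List (String × String)) : String :=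
  let parts := pvTokenize [] gene_string.toList
  let fixed := parts.mapIdx (fun i tok =>
    if i % 2 == 0 then
      match List.lookup (String.ofList tok) map_file_dict with
      | some v => v.toList
      | none => tok
    else tok)
  String.ofList (PySem.Chars.join [] fixed)

-- ===== PRECONDITION & SPEC =====
def Spec_fix_other (gene_string : String) (map_file_dict : List (String × String)) (out : String) : Prop := out = fix_other_alt gene_string map_file_dict
instance (gene_string : String) (map_file_dict : List (String × String)) (out : String) : Decidable (Spec_fix_other gene_string map_file_dict out) := by unfold Spec_fix_other; infer_instance

-- ===== CLAIM (what is proved, stated in full; the proofs are below) =====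
def Claim_equal_fix_other : Prop := ∀ (gene_string : String) (map_file_dict : List (String × String)), Dom_fix_other gene_string map_file_dict → Spec_fix_other gene_string map_file_dict (fix_other gene_string map_file_dict)

-- ===== LEMMAS AND PROOFS =====

-- the token replacement both programs perform
def pvF (d : List (String × String)) (t : List Char) : List Char :=
  match List.lookup (String.ofList t) d with
  | some v => v.toList
  | none => t

-- structural single-character split: pvSp c l = (first piece, remaining pieces)
def pvSp (c : Char) : List Char → List Char × List (List Char)
  | [] => ([], [])
  | x :: xs => let p := pvSp c xs; if x = c then ([], p.1 :: p.2) else (x :: p.1, p.2)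

def pvSplit (c : Char) (l : List Char) : List (List Char) := (pvSp c l).1 :: (pvSp c l).2

-- structural join
def pvJoin (sep : List Char) : List (List Char) → List Char
  | [] => []
  | [x] => x
  | x :: y :: r => x ++ sep ++ pvJoin sep (y :: r)

lemma pvJoin_eq (sep : List Char) (l : List (List Char)) : PySem.Chars.join sep l = pvJoin sep l := by
  induction l with
  | nil => simp [pvJoin, PySem.Chars.join_nil]
  | cons x r ih =>
    cases r with
    | nil => simp [pvJoin, PySem.Chars.join_singleton]
    | cons y t => simp [pvJoin, PySem.Chars.join_cons_cons] at *; simp [ih]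

lemma pvJoin_head_cons (sep x : List Char) (c : Char) (y : List Char) (r : List (List Char)) :
    pvJoin sep ((x ++ c :: y) :: r) = x ++ c :: pvJoin sep (y :: r) := by
  cases r with
  | nil => simp [pvJoin]
  | cons z t => simp [pvJoin]

lemma pvTokenize_ne_nil (acc cs : List Char) : pvTokenize acc cs ≠ [] := by
  induction cs generalizing acc with
  | nil => simp [pvTokenize]
  | cons c cs ih =>
    simp only [pvTokenize]
    split
    · simp
    · exact ih _

lemma pvSp_not_mem (c : Char) (l : List Char) (h : c ∉ l) : pvSp c l = (l, []) := by
  induction l with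
  | nil => simp [pvSp]
  | cons x xs ih =>
    simp only [List.mem_cons, not_or] at h
    simp [pvSp, ih h.2, Ne.symm h.1]

lemma pvSp_append (c : Char) (a l : List Char) (h : c ∉ a) :
    pvSp c (a ++ l) = (a ++ (pvSp c l).1, (pvSp c l).2) := by
  induction a with
  | nil => simp
  | cons x xs ih =>
    simp only [List.mem_cons, not_or] at h
    simp [pvSp, ih h.2, Ne.symm h.1]

lemma pvGo_singleton (c : Char) (l : List Char) : ∀ (fuel : Nat) (cur : List Char) (acc : List (List Char)),
    l.length ≤ fuel →
    PySem.Chars.splitOn.go [c] fuel l cur acc = acc.reverse ++ (cur.reverse ++ (pvSp c l).1) :: (pvSp c l).2 := by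
  induction l with
  | nil =>
    intro fuel cur acc _
    cases fuel <;> simp [PySem.Chars.splitOn.go, pvSp]
  | cons x xs ih =>
    intro fuel cur acc hf
    cases fuel with
    | zero => simp at hf
    | succ f =>
      simp only [List.length_cons, Nat.succ_le_succ_iff] at hf
      by_cases hx : x = c
      · subst hx
        simp [PySem.Chars.splitOn.go, List.isPrefixOf, ih f [] (cur.reverse :: acc) hf, pvSp]
      · simp [PySem.Chars.splitOn.go, List.isPrefixOf, Ne.symm hx,
              ih f (x :: cur) acc hf, pvSp, hx]

lemma pvSplitOn_singleton (c : Char) (l : List Char) :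
    PySem.Chars.splitOn l [c] = pvSplit c l := by
  have := pvGo_singleton c l (l.length + 1) [] [] (by omega)
  simpa [PySem.Chars.splitOn, pvSplit] using this

lemma pvFoldl_map (g : List Char → List Char) :
    ∀ (l : List (List Char)) (acc : List (List Char)),
      l.foldl (fun a x => a ++ [g x]) acc = acc ++ l.map g := by
  intro l
  induction l with
  | nil => simp
  | cons x xs ih => intro acc; simp [ih]

lemma pvMem_of_isIn (c : Char) (u : List Char) (h : PySem.Chars.isIn [c] u = false) : c ∉ u := by
  intro hm
  have hinf : [c] <:+: u := by
    obtain ⟨s, t, rfl⟩ := List.append_of_mem hm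
    exact ⟨s, t, by simp⟩
  rw [PySem.Chars.isIn_eq_false_iff] at h
  exact h hinf

-- the nested-split form of A
def pvP2 (d : List (String × String)) (u : List Char) : List Char :=
  pvJoin [':'] ((pvSplit ':' u).map (pvF d))
def pvP1 (d : List (String × String)) (t : List Char) : List Char :=
  pvJoin ['='] ((pvSplit '=' t).map (pvP2 d))
def pvA (d : List (String × String)) (s : List Char) : List Char :=
  pvJoin [';'] ((pvSplit ';' s).map (pvP1 d))

lemma pvPortA_eq (gs : String) (d : List (String × String)) :
    fix_other gs d = String.ofList (pvA d gs.toList) := by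
  unfold fix_other pvA
  rw [pvSplitOn_singleton]
  have hcolon : ∀ (item : List Char),
      (if PySem.Chars.isIn [':'] item then
        PySem.Chars.join [':']
          ((PySem.Chars.splitOn item [':']).foldl (fun split_colons thing1 =>
            match List.lookup (String.ofList thing1) d with
            | some correct_name => split_colons ++ [correct_name.toList]
            | none => split_colons ++ [thing1]) [])
      else
        match List.lookup (String.ofList item) d with
        | some new_name => new_name.toList
        | none => item) = pvP2 d item := by
    intro item
    have hbody : (fun (a : List (List Char)) (t : List Char) =>
        match List.lookup (String.ofList t) d with
        | some correct_name => a ++ [correct_name.toList]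
        | none => a ++ [t]) = fun a t => a ++ [pvF d t] := by
      funext a t
      unfold pvF
      cases List.lookup (String.ofList t) d <;> rfl
    by_cases h : PySem.Chars.isIn [':'] item
    · simp only [h, if_pos, hbody, pvFoldl_map, List.nil_append, pvSplitOn_singleton,
        pvJoin_eq, pvP2]
    · have hnm : ':' ∉ item := pvMem_of_isIn ':' item (by simpa using h)
      simp only [h, if_neg, Bool.false_eq_true, not_false_iff]
      unfold pvP2 pvSplit
      rw [pvSp_not_mem ':' item hnm]
      simp [pvJoin, pvF]
  -- the two outer loops
  have hbody2 : (fun (rwe : List (List Char)) (item : List Char) =>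
      if PySem.Chars.isIn [':'] item then
        rwe ++ [PySem.Chars.join [':']
          ((PySem.Chars.splitOn item [':']).foldl (fun split_colons thing1 =>
            match List.lookup (String.ofList thing1) d with
            | some correct_name => split_colons ++ [correct_name.toList]
            | none => split_colons ++ [thing1]) [])]
      else
        match List.lookup (String.ofList item) d with
        | some new_name => rwe ++ [new_name.toList]
        | none => rwe ++ [item]) = fun rwe item => rwe ++ [pvP2 d item] := by
    funext rwe item
    rw [← hcolon item]
    by_cases h : PySem.Chars.isIn [':'] item
    · simp [h]
    · simp only [h, Bool.false_eq_true, if_neg, not_false_iff]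
      cases List.lookup (String.ofList item) d <;> rfl
  rw [hbody2]
  have hP1 : ∀ (item : List Char),
      PySem.Chars.join ['=']
        ((PySem.Chars.splitOn item ['=']).foldl (fun a x => a ++ [pvP2 d x]) []) = pvP1 d item := by
    intro item
    rw [pvFoldl_map, pvSplitOn_singleton, pvJoin_eq]
    simp [pvP1]
  have hbody1 : (fun (a : List (List Char)) (item : List Char) =>
      a ++ [PySem.Chars.join ['=']
        ((PySem.Chars.splitOn item ['=']).foldl (fun a x => a ++ [pvP2 d x]) [])]) =
      fun a item => a ++ [pvP1 d item] := by
    funext a item; rw [hP1]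
  rw [hbody1]
  simp only [pvFoldl_map, pvJoin_eq, List.nil_append]

-- the single-pass form of B
def pvBspec (d : List (String × String)) (acc : List Char) : List Char → List Char
  | [] => pvF d acc.reverse
  | c :: cs => if pvDelim c then pvF d acc.reverse ++ c :: pvBspec d [] cs else pvBspec d (c :: acc) cs

lemma pvB_join (d : List (String × String)) :
    ∀ (cs acc : List Char),
      pvJoin [] ((pvTokenize acc cs).mapIdx (fun i tok => if i % 2 == 0 then pvF d tok else tok)) =
        pvBspec d acc cs := by
  intro cs
  induction cs with
  | nil => intro acc; simp [pvTokenize, pvBspec, pvJoin]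
  | cons c cs ih =>
    intro acc
    by_cases hc : pvDelim c
    · simp only [pvTokenize, hc, if_pos, pvBspec]
      rw [List.mapIdx_cons, List.mapIdx_cons]
      have hsh : (fun (i : Nat) (tok : List Char) =>
          if (i + 1 + 1) % 2 == 0 then pvF d tok else tok) =
          fun i tok => if i % 2 == 0 then pvF d tok else tok := by
        funext i tok
        have h2 : (i + 1 + 1) % 2 = i % 2 := by omega
        rw [h2]
      simp only [hsh]
      obtain ⟨m, ms, hM⟩ : ∃ m ms,
          (pvTokenize [] cs).mapIdx (fun i tok => if i % 2 == 0 then pvF d tok else tok) = m :: ms := by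
        cases h : pvTokenize [] cs with
        | nil => exact absurd h (pvTokenize_ne_nil [] cs)
        | cons p ps => exact ⟨_, _, by rw [List.mapIdx_cons]⟩
      rw [show ((0:Nat) % 2 == 0) = true by rfl, show ((1:Nat) % 2 == 0) = false by rfl]
      simp only [if_true, if_false, Bool.false_eq_true]
      rw [hM]
      simp only [pvJoin]
      rw [← hM, ih []]
      simp
    · simp only [pvTokenize, hc, Bool.false_eq_true, if_neg, not_false_iff, pvBspec]
      exact ih (c :: acc)

lemma pvPortB_eq (gs : String) (d : List (String × String)) :
    fix_other_alt gs d = String.ofList (pvBspec d [] gs.toList) := by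
  unfold fix_other_alt
  have hbody : (fun (i : Nat) (tok : List Char) =>
      if i % 2 == 0 then
        match List.lookup (String.ofList tok) d with
        | some v => v.toList
        | none => tok
      else tok) = fun i tok => if i % 2 == 0 then pvF d tok else tok := by
    funext i tok
    unfold pvF
    cases List.lookup (String.ofList tok) d <;> rfl
  simp only [hbody, pvJoin_eq]
  exact congrArg String.ofList (pvB_join d gs.toList [])

-- delim-free pieces are single tokens
lemma pvA_delimfree (d : List (String × String)) (a : List Char)
    (h : ∀ x ∈ a, pvDelim x = false) : pvA d a = pvF d a := by
  have hs : ';' ∉ a := fun hm => by simpa [pvDelim] using h _ hm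
  have he : '=' ∉ a := fun hm => by simpa [pvDelim] using h _ hm
  have hcn : ':' ∉ a := fun hm => by simpa [pvDelim] using h _ hm
  unfold pvA pvSplit
  rw [pvSp_not_mem ';' a hs]
  simp only [List.map_cons, List.map_nil, pvJoin]
  unfold pvP1 pvSplit
  rw [pvSp_not_mem '=' a he]
  simp only [List.map_cons, List.map_nil, pvJoin]
  unfold pvP2 pvSplit
  rw [pvSp_not_mem ':' a hcn]
  simp [pvJoin]

lemma pvMain (d : List (String × String)) :
    ∀ (s acc : List Char), (∀ x ∈ acc, pvDelim x = false) →
      pvA d (acc.reverse ++ s) = pvBspec d acc s := by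
  intro s
  induction s with
  | nil =>
    intro acc hacc
    simp only [List.append_nil, pvBspec]
    exact pvA_delimfree d acc.reverse (fun x hx => hacc x (by simpa using hx))
  | cons c s ih =>
    intro acc hacc
    have hrev : ∀ x ∈ acc.reverse, pvDelim x = false := fun x hx => hacc x (by simpa using hx)
    have hs : ';' ∉ acc.reverse := fun hm => by simpa [pvDelim] using hrev _ hm
    have he : '=' ∉ acc.reverse := fun hm => by simpa [pvDelim] using hrev _ hm
    have hcn : ':' ∉ acc.reverse := fun hm => by simpa [pvDelim] using hrev _ hm
    have hP1free : pvP1 d acc.reverse = pvF d acc.reverse := by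
      unfold pvP1 pvSplit
      rw [pvSp_not_mem '=' acc.reverse he]
      simp only [List.map_cons, List.map_nil, pvJoin]
      unfold pvP2 pvSplit
      rw [pvSp_not_mem ':' acc.reverse hcn]
      simp [pvJoin]
    by_cases hdc : pvDelim c
    · -- c is one of ';' '=' ':'
      have hc3 : c = ';' ∨ c = '=' ∨ c = ':' := by
        simp only [pvDelim, Bool.or_eq_true, beq_iff_eq] at hdc
        tauto
      rcases hc3 with rfl | rfl | rfl
      · -- ';'
        unfold pvA pvSplit
        rw [pvSp_append ';' acc.reverse (';' :: s) hs]
        have : pvSp ';' (';' :: s) = ([], (pvSp ';' s).1 :: (pvSp ';' s).2) := by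
          simp [pvSp]
        rw [this]
        simp only [List.append_nil, List.map_cons, pvJoin]
        rw [show pvBspec d acc (';' :: s) = pvF d acc.reverse ++ ';' :: pvBspec d [] s by
          simp [pvBspec, pvDelim]]
        rw [← ih [] (by simp)]
        simp only [List.reverse_nil, List.nil_append, pvA, pvSplit, List.map_cons]
        rw [hP1free]
        cases (pvSp ';' s).2 <;> simp [pvJoin]
      · -- '='
        unfold pvA pvSplit
        rw [pvSp_append ';' acc.reverse ('=' :: s) hs]
        have h1 : pvSp ';' ('=' :: s) = ('=' :: (pvSp ';' s).1, (pvSp ';' s).2) := by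
          simp [pvSp]
        rw [h1]
        simp only [List.map_cons]
        have hP1 : pvP1 d (acc.reverse ++ '=' :: (pvSp ';' s).1) =
            pvF d acc.reverse ++ '=' :: pvP1 d (pvSp ';' s).1 := by
          unfold pvP1 pvSplit
          rw [pvSp_append '=' acc.reverse ('=' :: (pvSp ';' s).1) he]
          have h2 : pvSp '=' ('=' :: (pvSp ';' s).1) =
              ([], (pvSp '=' (pvSp ';' s).1).1 :: (pvSp '=' (pvSp ';' s).1).2) := by
            simp [pvSp]
          rw [h2]
          simp only [List.append_nil, List.map_cons, pvJoin]
          have hP2free : pvP2 d acc.reverse = pvF d acc.reverse := by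
            unfold pvP2 pvSplit
            rw [pvSp_not_mem ':' acc.reverse hcn]
            simp [pvJoin]
          rw [hP2free]
          simp
        rw [hP1]
        rw [show pvBspec d acc ('=' :: s) = pvF d acc.reverse ++ '=' :: pvBspec d [] s by
          simp [pvBspec, pvDelim]]
        rw [← ih [] (by simp)]
        simp only [List.reverse_nil, List.nil_append, pvA, pvSplit, List.map_cons]
        rw [pvJoin_head_cons [';'] (pvF d acc.reverse) '=' (pvP1 d (pvSp ';' s).1)
          (((pvSp ';' s).2).map (pvP1 d))]
      · -- ':'
        unfold pvA pvSplit
        rw [pvSp_append ';' acc.reverse (':' :: s) hs]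
        have h1 : pvSp ';' (':' :: s) = (':' :: (pvSp ';' s).1, (pvSp ';' s).2) := by
          simp [pvSp]
        rw [h1]
        simp only [List.map_cons]
        have hP1 : pvP1 d (acc.reverse ++ ':' :: (pvSp ';' s).1) =
            pvF d acc.reverse ++ ':' :: pvP1 d (pvSp ';' s).1 := by
          unfold pvP1 pvSplit
          rw [pvSp_append '=' acc.reverse (':' :: (pvSp ';' s).1) he]
          have h2 : pvSp '=' (':' :: (pvSp ';' s).1) =
              (':' :: (pvSp '=' (pvSp ';' s).1).1, (pvSp '=' (pvSp ';' s).1).2) := by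
            simp [pvSp]
          rw [h2]
          simp only [List.map_cons]
          have hP2 : pvP2 d (acc.reverse ++ ':' :: (pvSp '=' (pvSp ';' s).1).1) =
              pvF d acc.reverse ++ ':' :: pvP2 d (pvSp '=' (pvSp ';' s).1).1 := by
            unfold pvP2 pvSplit
            rw [pvSp_append ':' acc.reverse (':' :: (pvSp '=' (pvSp ';' s).1).1) hcn]
            have h3 : pvSp ':' (':' :: (pvSp '=' (pvSp ';' s).1).1) =
                ([], (pvSp ':' (pvSp '=' (pvSp ';' s).1).1).1 ::
                     (pvSp ':' (pvSp '=' (pvSp ';' s).1).1).2) := by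
              simp [pvSp]
            rw [h3]
            simp only [List.append_nil, List.map_cons, pvJoin]
            simp
          rw [hP2]
          rw [pvJoin_head_cons ['='] (pvF d acc.reverse) ':'
            (pvP2 d (pvSp '=' (pvSp ';' s).1).1)
            (((pvSp '=' (pvSp ';' s).1).2).map (pvP2 d))]
        rw [hP1]
        rw [show pvBspec d acc (':' :: s) = pvF d acc.reverse ++ ':' :: pvBspec d [] s by
          simp [pvBspec, pvDelim]]
        rw [← ih [] (by simp)]
        simp only [List.reverse_nil, List.nil_append, pvA, pvSplit, List.map_cons]
        rw [pvJoin_head_cons [';'] (pvF d acc.reverse) ':' (pvP1 d (pvSp ';' s).1)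
          (((pvSp ';' s).2).map (pvP1 d))]
    · -- ordinary character
      have : acc.reverse ++ c :: s = (c :: acc).reverse ++ s := by simp
      rw [this, ih (c :: acc) (by
        intro x hx
        rcases List.mem_cons.mp hx with rfl | hx
        · simpa using hdc
        · exact hacc x hx)]
      simp [pvBspec, hdc]

-- ===== VERDICT (by name: the statement is the Claim_ definition above) =====
theorem fix_other_spec : Claim_equal_fix_other := by
  intro gs d _
  unfold Spec_fix_other
  have h := pvMain d gs.toList [] (by simp)
  simp only [List.reverse_nil, List.nil_append] at h
  rw [pvPortA_eq, pvPortB_eq, h]
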